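-- pv_equiv track=rewrite | github.com/ilkinmethanol/awsproject_notes | awsnotes_device_events/index.py | error_successCounter
-- ===== SOURCE A (Python) =====
-- def error_successCounter(stateTree):
--     '''
--     This method will grab stateTree and count false / true items . returns double value err_count and suc_count
--     '''
--     err_count = 0
--     suc_count = 0
--     for element in stateTree:
--         if element["operation_result"] == "False":
--             err_count = err_count+1
--         else:
--             suc_count = suc_count+1
--     return err_count,suc_count
-- ===== SOURCE B (Python) =====
-- def error_successCounter(stateTree):
--     elements = list(stateTree)
--
--     def go(lo, hi):
--         # counts (errors, successes) among elements[lo:hi] by divide and conquer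
--         if hi <= lo:
--             return 0, 0
--         if hi - lo == 1:
--             if elements[lo]["operation_result"] == "False":
--                 return 1, 0
--             return 0, 1
--         mid = (lo + hi) // 2
--         e1, s1 = go(lo, mid)
--         e2, s2 = go(mid, hi)
--         return e1 + e2, s1 + s2
--
--     return go(0, len(elements))
-- ===== Notes on version B (the rewrite author's own statement) =====
-- stated objective: alternative
-- what changed: B counts by divide and conquer: it recursively splits the index range [lo, hi) at the midpoint, counts each half, and adds the (err, suc) pairs, instead of A's single linear pass that increments two counters element by element.
import Mathlib
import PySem

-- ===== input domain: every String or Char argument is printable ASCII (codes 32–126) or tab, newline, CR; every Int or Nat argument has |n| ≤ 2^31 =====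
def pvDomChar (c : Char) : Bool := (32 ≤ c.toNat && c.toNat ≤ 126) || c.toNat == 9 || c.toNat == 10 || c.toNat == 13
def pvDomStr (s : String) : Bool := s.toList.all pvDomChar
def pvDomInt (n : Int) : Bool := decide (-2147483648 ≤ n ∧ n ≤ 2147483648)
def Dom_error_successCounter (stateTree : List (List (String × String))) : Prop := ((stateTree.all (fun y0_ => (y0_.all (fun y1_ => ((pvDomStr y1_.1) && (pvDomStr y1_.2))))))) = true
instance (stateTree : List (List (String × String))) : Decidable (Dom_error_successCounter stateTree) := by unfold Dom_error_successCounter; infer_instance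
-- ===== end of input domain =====

-- B replaces A's single linear pass with two counters by a divide-and-conquer recursion that
-- splits the index range at the midpoint and adds the subcounts (objective: alternative; no speed claim).

-- ===== PORT A =====
-- A's loop: two counters, incremented in the two branches.
def pvStepA (acc : Int × Int) (element : List (String × String)) : Int × Int :=
  if List.lookup "operation_result" element = some "False" then (acc.1 + 1, acc.2)
  else (acc.1, acc.2 + 1)

def error_successCounter (stateTree : List (List (String × String))) : Int × Int :=
  stateTree.foldl pvStepA (0, 0)

-- ===== PORT B =====
-- B's recursive go(lo, hi): counts over elements[lo:hi] by splitting at the midpoint.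
-- The fuel argument (always ≥ (hi-lo).toNat at every call B makes) only makes the same
-- computation total for Lean; the `none` branch of pyGet? is where Python would raise
-- IndexError — go never reaches either (it only indexes when hi - lo = 1, 0 ≤ lo < len).
def pvGo (fuel : Nat) (elements : List (List (String × String))) (lo hi : Int) : Int × Int :=
  match fuel with
  | 0 => (0, 0)
  | fuel + 1 =>
    if hi ≤ lo then (0, 0)
    else if hi - lo = 1 then
      match PySem.List.pyGet? elements lo with
      | some e => if List.lookup "operation_result" e = some "False" then (1, 0) else (0, 1)
      | none => (0, 0)
    else
      let mid := PySem.Int.floordiv (lo + hi) 2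
      let p1 := pvGo fuel elements lo mid
      let p2 := pvGo fuel elements mid hi
      (p1.1 + p2.1, p1.2 + p2.2)

def error_successCounter_alt (stateTree : List (List (String × String))) : Int × Int :=
  let elements := stateTree
  pvGo elements.length elements 0 (elements.length : Int)

-- ===== PRECONDITION & SPEC =====
-- Pre_ excludes inputs where some element lacks the key "operation_result": there the Python A
-- (and B alike) raises KeyError, so no value is claimed.
def Pre_error_successCounter (stateTree : List (List (String × String))) : Prop :=
  (stateTree.all (fun e => (List.lookup "operation_result" e).isSome)) = true
instance (stateTree : List (List (String × String))) : Decidable (Pre_error_successCounter stateTree) := by unfold Pre_error_successCounter; infer_instance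

def pvWitness_error_successCounter : (List (List (String × String))) :=
  [[("operation_result", "False")], [("operation_result", "True")]]

def Spec_error_successCounter (stateTree : List (List (String × String))) (out : Int × Int) : Prop := out = error_successCounter_alt stateTree
instance (stateTree : List (List (String × String))) (out : Int × Int) : Decidable (Spec_error_successCounter stateTree out) := by unfold Spec_error_successCounter; infer_instance

-- ===== CLAIM (what is proved, stated in full; the proofs are below) =====
def Claim_equal_error_successCounter : Prop := ∀ (stateTree : List (List (String × String))), Dom_error_successCounter stateTree → Pre_error_successCounter stateTree → Spec_error_successCounter stateTree (error_successCounter stateTree)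

-- ===== LEMMAS AND PROOFS =====
-- the predicate both programs branch on
def pvIsErr (e : List (String × String)) : Bool :=
  List.lookup "operation_result" e == some "False"

-- A's fold computes the two countP's of the whole list.
lemma foldA_eq (l : List (List (String × String))) :
    ∀ (a b : Int), l.foldl pvStepA (a, b) =
      (a + (l.countP pvIsErr : Int), b + (l.countP (fun e => ! pvIsErr e) : Int)) := by
  induction l with
  | nil => intro a b; simp
  | cons x xs ih =>
    intro a b
    simp only [List.foldl_cons, pvStepA, List.countP_cons]
    by_cases hl : List.lookup "operation_result" x = some "False"
    · have hx : pvIsErr x = true := by simp [pvIsErr, hl]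
      rw [if_pos hl, ih]
      simp only [hx, Bool.not_true, Prod.ext_iff]
      constructor <;> push_cast <;> ring
    · have hx : pvIsErr x = false := by simp [pvIsErr, hl]
      rw [if_neg hl, ih]
      simp only [hx, Bool.not_false, Prod.ext_iff]
      constructor <;> push_cast <;> ring

-- B's recursion computes the two countP's of the segment elements[lo:hi] (fuel sufficient).
lemma pvGo_eq (el : List (List (String × String))) :
    ∀ (fuel : Nat) (lo hi : Int), (hi - lo).toNat ≤ fuel → 0 ≤ lo → hi ≤ (el.length : Int) →
      pvGo fuel el lo hi =
        ((((el.drop lo.toNat).take (hi - lo).toNat).countP pvIsErr : Int),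
         (((el.drop lo.toNat).take (hi - lo).toNat).countP (fun e => ! pvIsErr e) : Int)) := by
  intro fuel
  induction fuel with
  | zero =>
    intro lo hi hn hlo hhi
    have h0 : (hi - lo).toNat = 0 := by omega
    simp [pvGo, h0]
  | succ fuel ih =>
    intro lo hi hn hlo hhi
    rw [pvGo]
    by_cases hle : hi ≤ lo
    · have h0 : (hi - lo).toNat = 0 := by omega
      simp [hle, h0]
    · by_cases h1 : hi - lo = 1
      · have hlt : lo.toNat < el.length := by omega
        have hget : PySem.List.pyGet? el lo = some el[lo.toNat] :=
          PySem.List.pyGet?_eq_some_getElem el hlo (by omega)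
        have hdrop : el.drop lo.toNat = el[lo.toNat] :: el.drop (lo.toNat + 1) :=
          List.drop_eq_getElem_cons hlt
        have htk : (hi - lo).toNat = 1 := by omega
        rw [if_neg hle, if_pos h1, hget, htk, hdrop, List.take_succ_cons, List.take_zero]
        by_cases hl : List.lookup "operation_result" el[lo.toNat] = some "False"
        · have hx : pvIsErr el[lo.toNat] = true := by simp [pvIsErr, hl]
          simp [hx, hl]
        · have hx : pvIsErr el[lo.toNat] = false := by simp [pvIsErr, hl]
          simp [hx, hl]
      · simp only [hle, if_false, h1, if_false]
        have hmid : PySem.Int.floordiv (lo + hi) 2 = (lo + hi) / 2 :=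
          PySem.Int.floordiv_eq_ediv_of_pos (by omega)
        set mid := PySem.Int.floordiv (lo + hi) 2 with hm
        have hb1 : lo < mid := by omega
        have hb2 : mid < hi := by omega
        rw [ih lo mid (by omega) hlo (by omega),
            ih mid hi (by omega) (by omega) hhi]
        have hsum : (hi - lo).toNat = (mid - lo).toNat + (hi - mid).toNat := by omega
        have hdd : (el.drop lo.toNat).drop (mid - lo).toNat = el.drop mid.toNat := by
          rw [List.drop_drop]
          congr 1
          omega
        rw [hsum, List.take_add, ← hdd, List.countP_append, List.countP_append]
        simp only [Prod.ext_iff]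
        constructor <;> push_cast <;> ring

-- ===== VERDICT (by name: the statement is the Claim_ definition above) =====
theorem error_successCounter_spec : Claim_equal_error_successCounter := by
  intro st _ _
  show error_successCounter st = error_successCounter_alt st
  simp only [error_successCounter, error_successCounter_alt]
  rw [foldA_eq st 0 0,
      pvGo_eq st st.length 0 (st.length : Int) (by omega) (by omega) (by omega)]
  simp
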